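-- pv_equiv track=rewrite | github.com/mspurushothama2011/IMPI | app/nlp_analyzer.py | _summarize_fallback
-- ===== SOURCE A (Python) =====
-- def _summarize_fallback(text: str, max_length: int = 500) -> str:
--     """Enhanced fallback summarization when AI services are unavailable."""
--     if not text:
--         return ''
--
--     # Split into sentences
--     sentences = [s.strip() for s in text.split('.') if s.strip()]
--
--     if len(sentences) <= 2:
--         return text[:max_length*5]  # If very short, just truncate
--
--     # Extract key information using patterns
--     key_sentences = []
--
--     # Look for decision-related sentences
--     decision_keywords = ['decided', 'agreed', 'approved', 'resolved', 'concluded', 'determined']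
--     for sentence in sentences:
--         if any(keyword in sentence.lower() for keyword in decision_keywords):
--             key_sentences.append(sentence)
--
--     # Look for action-related sentences
--     action_keywords = ['will', 'should', 'need to', 'must', 'have to', 'assigned', 'responsible']
--     for sentence in sentences:
--         if any(keyword in sentence.lower() for keyword in action_keywords):
--             key_sentences.append(sentence)
--
--     # Look for timeline/budget-related sentences
--     timeline_keywords = ['deadline', 'timeline', 'schedule', 'budget', 'cost', 'price', 'date']
--     for sentence in sentences:
--         if any(keyword in sentence.lower() for keyword in timeline_keywords):
--             key_sentences.append(sentence)
--
--     # If we found key sentences, use them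
--     if key_sentences:
--         # Remove duplicates while preserving order
--         unique_sentences = []
--         seen = set()
--         for sentence in key_sentences:
--             if sentence not in seen:
--                 unique_sentences.append(sentence)
--                 seen.add(sentence)
--
--         summary = '. '.join(unique_sentences[:5])  # Limit to 5 key sentences
--     else:
--         # Fallback to first and last sentences
--         first_sentences = sentences[:2]
--         last_sentences = sentences[-2:] if len(sentences) > 4 else sentences[-1:]
--
--         summary_parts = []
--         summary_parts.extend(first_sentences)
--         if len(sentences) > 4:
--             summary_parts.append("...")
--         summary_parts.extend(last_sentences)
--
--         summary = '. '.join(summary_parts)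
--
--     # Ensure it doesn't exceed max_length
--     if len(summary) > max_length*5:
--         summary = summary[:max_length*5] + "..."
--
--     return summary
-- ===== SOURCE B (Python) =====
-- def _summarize_fallback(text: str, max_length: int = 500) -> str:
--     """Priority-ranking re-implementation: each sentence gets the priority of the
--     first keyword group it matches; a stable sort by priority reproduces the
--     category-major order, then ordered dedup, top 5 and join."""
--     if not text:
--         return ''
--     sentences = [s.strip() for s in text.split('.') if s.strip()]
--     if len(sentences) <= 2:
--         return text[:max_length*5]
--
--     groups = [
--         ['decided', 'agreed', 'approved', 'resolved', 'concluded', 'determined'],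
--         ['will', 'should', 'need to', 'must', 'have to', 'assigned', 'responsible'],
--         ['deadline', 'timeline', 'schedule', 'budget', 'cost', 'price', 'date'],
--     ]
--
--     ranked = []
--     for sentence in sentences:
--         low = sentence.lower()
--         prio = next((p for p, kws in enumerate(groups)
--                      if any(k in low for k in kws)), None)
--         if prio is not None:
--             ranked.append((prio, sentence))
--
--     if ranked:
--         ranked.sort(key=lambda t: t[0])  # stable: original order within a priority
--         summary = '. '.join(list(dict.fromkeys(s for _, s in ranked))[:5])
--     else:
--         parts = sentences[:2]
--         if len(sentences) > 4:
--             parts += ["..."] + sentences[-2:]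
--         else:
--             parts += sentences[-1:]
--         summary = '. '.join(parts)
--
--     if len(summary) > max_length*5:
--         summary = summary[:max_length*5] + "..."
--     return summary
-- ===== Notes on version B (the rewrite author's own statement) =====
-- stated objective: alternative
-- what changed: B replaces A's three category-wise scans plus seen-set dedup by a priority-ranking algorithm: one pass annotates each sentence with the index of the first keyword group it matches (sentences matching no group are dropped), a stable sort by that priority recreates the category-major order, then dict.fromkeys dedups and the top 5 are joined; correctness rests on the fact that a sentence's first occurrence in A's concatenation is exactly its minimal (group, position) key.
import Mathlib
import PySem

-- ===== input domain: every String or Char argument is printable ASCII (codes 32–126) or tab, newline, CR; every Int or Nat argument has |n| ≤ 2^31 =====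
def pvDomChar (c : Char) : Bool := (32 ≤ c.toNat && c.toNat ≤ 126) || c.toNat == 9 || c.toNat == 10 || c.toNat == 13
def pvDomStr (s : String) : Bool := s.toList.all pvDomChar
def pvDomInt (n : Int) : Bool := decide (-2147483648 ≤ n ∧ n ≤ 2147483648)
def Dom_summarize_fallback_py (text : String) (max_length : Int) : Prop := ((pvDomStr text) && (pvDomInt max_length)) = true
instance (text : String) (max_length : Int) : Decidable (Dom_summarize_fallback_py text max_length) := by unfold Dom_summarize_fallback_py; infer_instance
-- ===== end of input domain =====

-- B replaces A's three category-wise scans + seen-set dedup by a priority-ranking algorithm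
-- (annotate each sentence with its first matching keyword group, stable-sort by that priority,
-- dedup, top 5); objective: alternative. Equivalence of return values is proved.

-- ===== PORT A =====
-- loop body of A's duplicate-removal loop (unique list + seen set)
def pvDedupStep (p : List String × PySem.Set String) (s : String) :
    List String × PySem.Set String :=
  if PySem.Set.contains p.2 s then p else (p.1 ++ [s], PySem.Set.add p.2 s)

def pvKwDecision : List String := ["decided", "agreed", "approved", "resolved", "concluded", "determined"]
def pvKwAction : List String := ["will", "should", "need to", "must", "have to", "assigned", "responsible"]
def pvKwTimeline : List String := ["deadline", "timeline", "schedule", "budget", "cost", "price", "date"]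

-- any(keyword in sentence.lower() for keyword in kws)
def pvHasKw (kws : List String) (s : String) : Bool :=
  kws.any (fun k => PySem.Str.isIn k (PySem.Str.lower s))

-- [s.strip() for s in text.split('.') if s.strip()]
def pvSentences (text : String) : List String :=
  (((PySem.Str.split? text ".").getD []).map PySem.Str.strip).filter (fun t => t ≠ "")

def summarize_fallback_py (text : String) (max_length : Int) : String :=
  if text = "" then "" else
  let sentences := pvSentences text
  if sentences.length ≤ 2 then PySem.Str.slice text none (some (max_length * 5)) else
  -- three passes, each appending matching sentences to key_sentences
  let key_sentences : List String :=
    sentences.foldl (fun acc s => if pvHasKw pvKwDecision s then acc ++ [s] else acc) []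
  let key_sentences :=
    sentences.foldl (fun acc s => if pvHasKw pvKwAction s then acc ++ [s] else acc) key_sentences
  let key_sentences :=
    sentences.foldl (fun acc s => if pvHasKw pvKwTimeline s then acc ++ [s] else acc) key_sentences
  let summary :=
    if key_sentences ≠ [] then
      -- remove duplicates while preserving order, via a seen-set loop
      let us := key_sentences.foldl pvDedupStep ([], PySem.Set.empty)
      PySem.Str.join ". " (PySem.List.slice us.1 none (some 5))
    else
      let first_sentences := PySem.List.slice sentences none (some 2)
      let last_sentences := if sentences.length > 4 then PySem.List.slice sentences (some (-2)) none
                            else PySem.List.slice sentences (some (-1)) none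
      let parts := first_sentences
      let parts := if sentences.length > 4 then parts ++ ["..."] else parts
      let parts := parts ++ last_sentences
      PySem.Str.join ". " parts
  if PySem.Str.len summary > max_length * 5 then
    PySem.Str.slice summary none (some (max_length * 5)) ++ "..."
  else summary

-- ===== PORT B =====
-- groups = [decision, action, timeline] keyword lists
def pvGroups : List (List String) := [pvKwDecision, pvKwAction, pvKwTimeline]

-- prio = next((p for p, kws in enumerate(groups) if any(k in low for k in kws)), None)
def pvPrio? (s : String) : Option Int :=
  let low := PySem.Str.lower s
  ((PySem.List.enumerate pvGroups).find?
      (fun pk => pk.2.any (fun k => PySem.Str.isIn k low))).map (·.1)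

-- loop body: if prio is not None: ranked.append((prio, sentence))
def pvRankStep (acc : List (Int × String)) (s : String) : List (Int × String) :=
  match pvPrio? s with
  | some p => acc ++ [(p, s)]
  | none => acc

def summarize_fallback_py_alt (text : String) (max_length : Int) : String :=
  if text = "" then "" else
  let sentences := pvSentences text
  if sentences.length ≤ 2 then PySem.Str.slice text none (some (max_length * 5)) else
  -- one pass: each sentence gets the priority of the first keyword group it matches
  let ranked : List (Int × String) := sentences.foldl pvRankStep []
  let summary :=
    if ranked ≠ [] then
      -- stable sort by priority, then ordered dedup (dict.fromkeys), top 5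
      let ranked := PySem.List.sorted ranked (fun t => t.1) false
      PySem.Str.join ". " (PySem.List.slice (PySem.List.dedup (ranked.map (·.2))) none (some 5))
    else
      let parts := PySem.List.slice sentences none (some 2)
      let parts :=
        if sentences.length > 4 then
          parts ++ ["..."] ++ PySem.List.slice sentences (some (-2)) none
        else parts ++ PySem.List.slice sentences (some (-1)) none
      PySem.Str.join ". " parts
  if PySem.Str.len summary > max_length * 5 then
    PySem.Str.slice summary none (some (max_length * 5)) ++ "..."
  else summary

-- ===== PRECONDITION & SPEC =====
def Spec_summarize_fallback_py (text : String) (max_length : Int) (out : String) : Prop := out = summarize_fallback_py_alt text max_length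
instance (text : String) (max_length : Int) (out : String) : Decidable (Spec_summarize_fallback_py text max_length out) := by unfold Spec_summarize_fallback_py; infer_instance

-- ===== CLAIM (what is proved, stated in full; the proofs are below) =====
def Claim_equal_summarize_fallback_py : Prop := ∀ (text : String) (max_length : Int), Dom_summarize_fallback_py text max_length → Spec_summarize_fallback_py text max_length (summarize_fallback_py text max_length)

-- ===== LEMMAS AND PROOFS =====

-- B's ranked list, as a filterMap (what the foldl computes)
def pvRankList (ss : List String) : List (Int × String) :=
  ss.filterMap (fun s => (pvPrio? s).map (fun p => (p, s)))

theorem pvRank_foldl (ss : List String) (acc : List (Int × String)) :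
    ss.foldl pvRankStep acc = acc ++ pvRankList ss := by
  induction ss generalizing acc with
  | nil => simp [pvRankList]
  | cons s t ih =>
    simp only [List.foldl_cons, pvRankStep, pvRankList, List.filterMap_cons]
    cases h : pvPrio? s <;> simp [ih, pvRankList]

-- the priority is the index of the first matching keyword group
theorem pvPrio_eq (s : String) :
    pvPrio? s = if pvHasKw pvKwDecision s then some 0
                else if pvHasKw pvKwAction s then some 1
                else if pvHasKw pvKwTimeline s then some 2 else none := by
  unfold pvPrio? pvGroups
  dsimp only
  rw [show (fun (pk : Int × List String) => pk.2.any (fun k => PySem.Str.isIn k (PySem.Str.lower s)))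
        = (fun (pk : Int × List String) => pvHasKw pk.2 s) from rfl]
  cases h0 : pvHasKw pvKwDecision s <;> cases h1 : pvHasKw pvKwAction s <;>
    cases h2 : pvHasKw pvKwTimeline s <;>
      simp [PySem.List.enumerate_cons, PySem.List.enumerate_nil, h0, h1, h2]

-- head unfolding of the ranked list
theorem pvRankList_cons (s : String) (t : List String) :
    pvRankList (s :: t)
      = (if pvHasKw pvKwDecision s then [((0 : Int), s)]
         else if pvHasKw pvKwAction s then [((1 : Int), s)]
         else if pvHasKw pvKwTimeline s then [((2 : Int), s)] else []) ++ pvRankList t := by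
  simp only [pvRankList, List.filterMap_cons, pvPrio_eq]
  split_ifs <;> simp

theorem pvRank_snd0 (ss : List String) :
    ((pvRankList ss).filter (fun t => t.1 == 0)).map (·.2)
      = ss.filter (pvHasKw pvKwDecision) := by
  induction ss with
  | nil => rfl
  | cons s t ih =>
    rw [pvRankList_cons]
    simp only [List.filter_append, List.map_append, List.filter_cons]
    split_ifs <;> simp_all

theorem pvRank_snd1 (ss : List String) :
    ((pvRankList ss).filter (fun t => t.1 == 1)).map (·.2)
      = ss.filter (fun s => pvHasKw pvKwAction s && !pvHasKw pvKwDecision s) := by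
  induction ss with
  | nil => rfl
  | cons s t ih =>
    rw [pvRankList_cons]
    simp only [List.filter_append, List.map_append, List.filter_cons]
    split_ifs with h0 h1 h2 <;> simp_all

theorem pvRank_snd2 (ss : List String) :
    ((pvRankList ss).filter (fun t => t.1 == 2)).map (·.2)
      = ss.filter (fun s => pvHasKw pvKwTimeline s && (!pvHasKw pvKwDecision s && !pvHasKw pvKwAction s)) := by
  induction ss with
  | nil => rfl
  | cons s t ih =>
    rw [pvRankList_cons]
    simp only [List.filter_append, List.map_append, List.filter_cons]
    split_ifs with h0 h1 h2 <;> simp_all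

theorem pvRank_keys (ss : List String) :
    ∀ t ∈ pvRankList ss, t.1 = 0 ∨ t.1 = 1 ∨ t.1 = 2 := by
  induction ss with
  | nil => simp [pvRankList]
  | cons s t ih =>
    intro u hu
    rw [pvRankList_cons] at hu
    rcases List.mem_append.1 hu with hu | hu
    · split_ifs at hu <;> simp_all
    · exact ih u hu

theorem pvRank_nil_iff (ss : List String) :
    pvRankList ss = [] ↔
      (ss.filter (pvHasKw pvKwDecision) = [] ∧ ss.filter (pvHasKw pvKwAction) = []
        ∧ ss.filter (pvHasKw pvKwTimeline) = []) := by
  induction ss with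
  | nil => simp [pvRankList]
  | cons s t ih =>
    rw [pvRankList_cons]
    simp only [List.filter_cons]
    split_ifs <;> simp_all

-- insertion skips a prefix it compares as not-before
theorem pvInsertBy_skip {α : Type} (before : α → α → Bool) (x : α) (ys zs : List α)
    (h : ∀ y ∈ ys, before x y = false) :
    PySem.List.insertBy before x (ys ++ zs) = ys ++ PySem.List.insertBy before x zs := by
  induction ys with
  | nil => simp
  | cons y t ih =>
    have hy : before x y = false := h y (by simp)
    simp only [List.cons_append, PySem.List.insertBy, hy]
    simp only [Bool.false_eq_true, if_false]
    rw [ih (fun z hz => h z (by simp [hz]))]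

-- insertion lands in front of a block it compares as before
theorem pvInsertBy_front {α : Type} (before : α → α → Bool) (x : α) (zs : List α)
    (h : ∀ y ∈ zs, before x y = true) :
    PySem.List.insertBy before x zs = x :: zs := by
  cases zs with
  | nil => rfl
  | cons z t => simp [PySem.List.insertBy, h z (by simp)]

-- stable sort of a {0,1,2}-keyed list is the three key-blocks in order
theorem pvSort_partition (l : List (Int × String))
    (h : ∀ t ∈ l, t.1 = 0 ∨ t.1 = 1 ∨ t.1 = 2) :
    PySem.List.sorted l (fun t => t.1) false
      = l.filter (fun t => t.1 == 0) ++ l.filter (fun t => t.1 == 1)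
          ++ l.filter (fun t => t.1 == 2) := by
  induction l using List.reverseRecOn with
  | nil => rfl
  | append_singleton l x ih =>
    have hl : ∀ t ∈ l, t.1 = 0 ∨ t.1 = 1 ∨ t.1 = 2 := fun t ht => h t (by simp [ht])
    have hx : x.1 = 0 ∨ x.1 = 1 ∨ x.1 = 2 := h x (by simp)
    rw [PySem.List.sorted_eq_foldl_insertBy] at *
    rw [List.foldl_append, List.foldl_cons, List.foldl_nil, ih hl]
    have m0 : ∀ y ∈ l.filter (fun t => t.1 == 0), y.1 = 0 := by
      intro y hy; simpa using (List.of_mem_filter hy)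
    have m1 : ∀ y ∈ l.filter (fun t => t.1 == 1), y.1 = 1 := by
      intro y hy; simpa using (List.of_mem_filter hy)
    have m2 : ∀ y ∈ l.filter (fun t => t.1 == 2), y.1 = 2 := by
      intro y hy; simpa using (List.of_mem_filter hy)
    rcases hx with hx | hx | hx
    · rw [List.append_assoc,
          pvInsertBy_skip _ x _ _ (fun y hy => by simp [hx, m0 y hy]),
          pvInsertBy_front _ x _ (fun y hy => by
            rcases List.mem_append.1 hy with hy | hy
            · simp [hx, m1 y hy]
            · simp [hx, m2 y hy])]
      simp [List.filter_append, hx]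
    · rw [pvInsertBy_skip _ x (List.filter (fun t => t.1 == 0) l ++ List.filter (fun t => t.1 == 1) l) _
            (fun y hy => by
              rcases List.mem_append.1 hy with hy | hy
              · simp [hx, m0 y hy]
              · simp [hx, m1 y hy]),
          pvInsertBy_front _ x _ (fun y hy => by simp [hx, m2 y hy])]
      simp [List.filter_append, hx]
    · rw [PySem.List.insertBy_of_forall_not_before _ x _ (fun y hy => by
            rcases List.mem_append.1 hy with hy | hy
            · rcases List.mem_append.1 hy with hy | hy
              · simp [hx, m0 y hy]
              · simp [hx, m1 y hy]
            · simp [hx, m2 y hy])]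
      simp [List.filter_append, hx]

-- membership is preserved by the dedup fold
theorem pvMem_foldl_add (l : List String) (acc : PySem.Set String) (x : String)
    (h : x ∈ acc ∨ x ∈ l) : x ∈ List.foldl PySem.Set.add acc l := by
  induction l generalizing acc with
  | nil => simpa using h
  | cons y t ih =>
    rw [List.foldl_cons]
    apply ih
    rcases h with h | h
    · left
      simp only [PySem.Set.add]
      split <;> simp [h]
    · rcases List.mem_cons.1 h with rfl | h
      · left
        simp only [PySem.Set.add]
        split <;> simp_all
      · exact Or.inr h

-- dropping, before dedup, elements that are already in the accumulator changes nothing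
theorem pvFoldl_add_subfilter (ss : List String) (p q : String → Bool)
    (acc : PySem.Set String) (h : ∀ x ∈ ss, p x = true → q x = false → x ∈ acc) :
    List.foldl PySem.Set.add acc (ss.filter (fun s => p s && q s))
      = List.foldl PySem.Set.add acc (ss.filter p) := by
  induction ss generalizing acc with
  | nil => rfl
  | cons s t ih =>
    simp only [List.filter_cons]
    by_cases hp : p s
    · by_cases hq : q s
      · simp only [hp, hq, Bool.and_self, if_pos, List.foldl_cons]
        exact ih (PySem.Set.add acc s) (fun x hx hpx hqx => by
          have hin := h x (by simp [hx]) hpx hqx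
          simp only [PySem.Set.add]
          split <;> simp [hin])
      · have hmem : s ∈ acc := h s (by simp) hp (by simpa using hq)
        have hadd : PySem.Set.add acc s = acc := by
          simp [PySem.Set.add, hmem]
        simp only [hp, hq]
        simp only [Bool.and_false, Bool.false_eq_true, if_false, if_true, List.foldl_cons, hadd]
        exact ih acc (fun x hx hpx hqx => h x (by simp [hx]) hpx hqx)
    · simp only [hp, Bool.false_and, Bool.false_eq_true, if_false]
      exact ih acc (fun x hx hpx hqx => h x (by simp [hx]) hpx hqx)

-- A's seen-set dedup loop is ordered dedup (the list and the set evolve identically)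
theorem pv_dedup_loop_eq (ks : List String) (acc : List String) :
    ks.foldl pvDedupStep (acc, acc)
    = (ks.foldl PySem.Set.add acc, ks.foldl PySem.Set.add acc) := by
  induction ks generalizing acc with
  | nil => rfl
  | cons s rest ih =>
    simp only [List.foldl_cons, pvDedupStep]
    split_ifs <;> simp_all [PySem.Set.add]

-- B's dedup input (min-category blocks) dedups to the same list as A's concatenation
theorem pvDedup_blocks (ss : List String) :
    List.foldl PySem.Set.add PySem.Set.empty
        (ss.filter (pvHasKw pvKwDecision)
          ++ ss.filter (fun s => pvHasKw pvKwAction s && !pvHasKw pvKwDecision s)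
          ++ ss.filter (fun s => pvHasKw pvKwTimeline s && (!pvHasKw pvKwDecision s && !pvHasKw pvKwAction s)))
      = List.foldl PySem.Set.add PySem.Set.empty
          (ss.filter (pvHasKw pvKwDecision) ++ ss.filter (pvHasKw pvKwAction)
            ++ ss.filter (pvHasKw pvKwTimeline)) := by
  have hAct : ∀ x ∈ ss, pvHasKw pvKwAction x = true → (!pvHasKw pvKwDecision x) = false →
      x ∈ List.foldl PySem.Set.add PySem.Set.empty (ss.filter (pvHasKw pvKwDecision)) := by
    intro x hx _ hdec
    exact pvMem_foldl_add _ _ _ (Or.inr (List.mem_filter.2 ⟨hx, by simpa using hdec⟩))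
  have hTim : ∀ x ∈ ss, pvHasKw pvKwTimeline x = true →
      (!pvHasKw pvKwDecision x && !pvHasKw pvKwAction x) = false →
      x ∈ List.foldl PySem.Set.add
            (List.foldl PySem.Set.add PySem.Set.empty (ss.filter (pvHasKw pvKwDecision)))
            (ss.filter (fun s => pvHasKw pvKwAction s && !pvHasKw pvKwDecision s)) := by
    intro x hx _ hq
    by_cases hd : pvHasKw pvKwDecision x
    · exact pvMem_foldl_add _ _ _ (Or.inl (pvMem_foldl_add _ _ _
        (Or.inr (List.mem_filter.2 ⟨hx, hd⟩))))
    · have ha : pvHasKw pvKwAction x = true := by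
        cases h' : pvHasKw pvKwAction x <;> simp_all
      exact pvMem_foldl_add _ _ _ (Or.inr (List.mem_filter.2 ⟨hx, by simp [ha, hd]⟩))
  simp only [List.foldl_append]
  rw [pvFoldl_add_subfilter ss _ _ _ hTim, pvFoldl_add_subfilter ss _ _ _ hAct]

-- ===== VERDICT (by name: the statement is the Claim_ definition above) =====
theorem summarize_fallback_py_spec : Claim_equal_summarize_fallback_py := by
  intro text max_length _
  unfold Spec_summarize_fallback_py summarize_fallback_py summarize_fallback_py_alt
  by_cases h0 : text = ""
  · simp [h0]
  · simp only [h0, if_false]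
    by_cases h2 : (pvSentences text).length ≤ 2
    · simp [h2]
    · simp only [h2, if_false]
      have hA : ∀ (p : String → Bool) (init : List String),
          (pvSentences text).foldl (fun acc s => if p s then acc ++ [s] else acc) init
            = init ++ (pvSentences text).filter p := fun p init => by
        simpa using PySem.List.foldl_append_if p id (pvSentences text) init
      rw [hA, hA, hA, pvRank_foldl]
      simp only [List.nil_append, List.append_assoc]
      have hcond : (pvRankList (pvSentences text) ≠ [])
          ↔ ((pvSentences text).filter (pvHasKw pvKwDecision)
              ++ ((pvSentences text).filter (pvHasKw pvKwAction)
                ++ (pvSentences text).filter (pvHasKw pvKwTimeline)) ≠ []) := by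
        rw [not_iff_not, pvRank_nil_iff]
        simp [List.append_eq_nil_iff]
      by_cases hk : pvRankList (pvSentences text) = []
      · simp only [hk, hcond.not_left.1 (by simp [hk]), ne_eq, not_true_eq_false, if_false]
        by_cases h4 : (pvSentences text).length > 4 <;>
          simp only [h4, List.append_assoc, ite_true, ite_false]
      · have hk' := hcond.1 hk
        simp only [ne_eq, hk, hk', not_false_eq_true, if_true]
        rw [pvSort_partition _ (pvRank_keys (pvSentences text)),
            List.map_append, List.map_append,
            pvRank_snd0, pvRank_snd1, pvRank_snd2]
        simp only [PySem.List.dedup_eq_ofList, PySem.Set.ofList]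
        rw [pvDedup_blocks (pvSentences text)]
        rw [show (PySem.Set.empty : PySem.Set String) = ([] : List String) from rfl]
        rw [pv_dedup_loop_eq]
        simp only [List.foldl_append]
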